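-- pv_equiv track=rewrite | github.com/LukasFiala0/Algorithms-DataStructures | HashTable/Exercise.py | number_of_vowels
-- ===== SOURCE A (Python) =====
-- def number_of_vowels(text:str) -> tuple:
--     vowels = {'a','e', 'i', 'o', 'u'}
--     text = text.lower()
--     hashtable = {}
--
--     for char in text:
--         if char in vowels:
--             hashtable[char] = hashtable.get(char, 0) + 1
--
--     return list(dict(sorted(hashtable.items(), key=lambda item: item[1], reverse=True)).items())
-- ===== SOURCE B (Python) =====
-- def number_of_vowels(text: str) -> tuple:
--     text = text.lower()
--     order = [c for c in dict.fromkeys(text) if c in 'aeiou']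
--     pairs = [(v, text.count(v)) for v in order]
--     return sorted(pairs, key=lambda x: x[1], reverse=True)
-- ===== Notes on version B (the rewrite author's own statement) =====
-- stated objective: alternative
-- what changed: Replaces A's single accumulating-dict pass and dict round-trip by dedup-then-count: distinct vowels in first-appearance order via dict.fromkeys, each counted with C-level str.count, then the same stable reverse sort.
import Mathlib
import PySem

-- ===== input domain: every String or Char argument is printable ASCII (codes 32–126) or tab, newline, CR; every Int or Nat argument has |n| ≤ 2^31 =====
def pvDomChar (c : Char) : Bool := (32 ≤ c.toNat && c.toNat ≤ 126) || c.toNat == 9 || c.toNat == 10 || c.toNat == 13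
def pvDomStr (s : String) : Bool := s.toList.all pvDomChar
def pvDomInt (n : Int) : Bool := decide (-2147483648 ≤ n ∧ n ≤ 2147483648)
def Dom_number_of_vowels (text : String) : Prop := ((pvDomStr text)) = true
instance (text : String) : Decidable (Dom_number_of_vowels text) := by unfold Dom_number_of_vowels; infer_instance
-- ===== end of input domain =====

-- B replaces A's single accumulating dict pass by dedup-then-count (distinct vowels in first-appearance
-- order, each counted by str.count) followed by the same stable reverse sort; objective: alternative.

-- ===== PORT A =====
-- Python dict keys here are one-character strings; they are represented as Char while the dict is
-- built and converted to String in the returned items (exact: chars of a str ↔ 1-char strings).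
def number_of_vowels (text : String) : List (String × Int) :=
  let vowels : PySem.Set Char := PySem.Set.ofList ['a', 'e', 'i', 'o', 'u']
  let t := PySem.Str.lower text
  let hashtable : PySem.Dict Char Int :=
    t.toList.foldl (fun d c => if vowels.contains c then d.insert c (d.getD c 0 + 1) else d)
      PySem.Dict.empty
  ((PySem.Dict.ofList (PySem.List.sorted hashtable.items (fun it => it.2) true)).items).map
    (fun it => (String.ofList [it.1], it.2))

-- ===== PORT B =====
-- 'c in "aeiou"' on a single character is character membership (exact for 1-char needles).
def number_of_vowels_alt (text : String) : List (String × Int) :=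
  let t := PySem.Str.lower text
  let order := (PySem.List.dedup t.toList).filter (fun c => "aeiou".toList.contains c)
  let pairs := order.map (fun c => (String.ofList [c], (PySem.Str.count t (String.ofList [c]) : Int)))
  PySem.List.sorted pairs (fun p => p.2) true

-- ===== PRECONDITION & SPEC =====
def Spec_number_of_vowels (text : String) (out : List (String × Int)) : Prop := out = number_of_vowels_alt text
instance (text : String) (out : List (String × Int)) : Decidable (Spec_number_of_vowels text out) := by unfold Spec_number_of_vowels; infer_instance

-- ===== CLAIM (what is proved, stated in full; the proofs are below) =====
def Claim_equal_number_of_vowels : Prop := ∀ (text : String), Dom_number_of_vowels text → Spec_number_of_vowels text (number_of_vowels text)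

-- ===== LEMMAS AND PROOFS =====

-- the loop 'for c: if q c then bump d[c]' is the unconditional bump loop over the filtered list
theorem foldl_if_insert_filter (q : Char → Bool) (l : List Char) (d : PySem.Dict Char Int) :
    l.foldl (fun d c => if q c then d.insert c (d.getD c 0 + 1) else d) d
      = (l.filter q).foldl (fun d c => d.insert c (d.getD c 0 + 1)) d := by
  induction l generalizing d with
  | nil => rfl
  | cons x xs ih =>
    by_cases h : q x = true <;> simp [List.filter, h, ih]

-- set(xs) commutes with filter
theorem ofList_filter (q : Char → Bool) (l : List Char) :
    PySem.Set.ofList (l.filter q) = (PySem.Set.ofList l).filter q := by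
  induction l with
  | nil => rfl
  | cons x xs ih =>
    by_cases h : q x = true
    · simp [List.filter, h, PySem.Set.ofList_cons, ih, PySem.Set.discard, List.filter_filter]
      congr 1
      funext a
      by_cases ha : a = x
      · simp [ha, h]
      · exact Bool.and_comm _ _
    · simp [List.filter, h, PySem.Set.ofList_cons, ih, PySem.Set.discard, List.filter_filter]
      apply List.filter_congr
      intro a _
      by_cases ha : a = x <;> simp [ha, h]

-- str.count with a single-character needle is character count
theorem count_go_singleton (c : Char) (fuel : Nat) (l : List Char) (acc : Nat)
    (h : l.length ≤ fuel) :
    PySem.Chars.count.go [c] fuel l acc = acc + l.count c := by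
  induction fuel generalizing l acc with
  | zero =>
    have : l = [] := List.eq_nil_of_length_eq_zero (Nat.le_zero.mp h)
    subst this; rfl
  | succ n ih =>
    cases l with
    | nil => rfl
    | cons x t =>
      simp only [List.length_cons, Nat.succ_le_succ_iff] at h
      by_cases hx : x = c
      · subst hx
        simp [PySem.Chars.count.go, List.isPrefixOf, ih _ _ h]
        omega
      · have : ([c].isPrefixOf (x :: t)) = false := by
          simp [List.isPrefixOf]
          exact fun hc => absurd hc.symm hx
        simp [PySem.Chars.count.go, this, ih _ _ h, hx]

theorem chars_count_singleton (l : List Char) (c : Char) :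
    PySem.Chars.count l [c] = l.count c := by
  simpa using count_go_singleton c l.length l 0 le_rfl

-- insertBy commutes with a map that preserves the comparison
theorem map_insertBy {α β : Type} (g : α → β) (ba : α → α → Bool) (bb : β → β → Bool)
    (h : ∀ a b, bb (g a) (g b) = ba a b) (x : α) (ys : List α) :
    (PySem.List.insertBy ba x ys).map g = PySem.List.insertBy bb (g x) (ys.map g) := by
  induction ys with
  | nil => rfl
  | cons y ys ih =>
    simp only [PySem.List.insertBy, List.map, h]
    by_cases hb : ba x y = true <;> simp [hb, ih]

theorem foldl_insertBy_map {α β : Type} (g : α → β) (ba : α → α → Bool) (bb : β → β → Bool)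
    (h : ∀ a b, bb (g a) (g b) = ba a b) (xs : List α) (acc : List α) :
    (xs.foldl (fun acc x => PySem.List.insertBy ba x acc) acc).map g
      = (xs.map g).foldl (fun acc y => PySem.List.insertBy bb y acc) (acc.map g) := by
  induction xs generalizing acc with
  | nil => rfl
  | cons x xs ih => simp [ih, map_insertBy g ba bb h]

-- stable reverse sort on the snd component commutes with a snd-preserving map
theorem sorted_map_snd {α β : Type} (g : α → β) (k1 : α → Int) (k2 : β → Int)
    (h : ∀ a, k2 (g a) = k1 a) (xs : List α) :
    (PySem.List.sorted xs k1 true).map g = PySem.List.sorted (xs.map g) k2 true := by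
  rw [PySem.List.sorted_rev_eq_foldl_insertBy, PySem.List.sorted_rev_eq_foldl_insertBy]
  exact foldl_insertBy_map g _ _ (by intro a b; simp [h]) xs []

-- dict(pairs) on a key-nodup pairs list reproduces the list as its items
theorem items_ofList_of_nodup {ν : Type} (pairs : List (Char × ν))
    (h : (pairs.map Prod.fst).Nodup) :
    (PySem.Dict.ofList pairs).items = pairs := by
  have := PySem.Dict.items_foldl_insert_fresh pairs Prod.fst Prod.snd
      (PySem.Dict.empty : PySem.Dict Char ν) (by intro a _; simp) h
  simpa [PySem.Dict.ofList, PySem.Dict.update] using this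

set_option maxHeartbeats 1000000 in
theorem number_of_vowels_eq_alt (text : String) :
    number_of_vowels text = number_of_vowels_alt text := by
  unfold number_of_vowels number_of_vowels_alt
  simp only []
  set t := PySem.Str.lower text with ht
  set q : Char → Bool := fun c => "aeiou".toList.contains c with hq
  have hqv : ∀ c, (PySem.Set.ofList ['a', 'e', 'i', 'o', 'u'] : PySem.Set Char).contains c = q c := by
    intro c; simp [PySem.Set.contains, hq]
  -- A's dict is the counter of the filtered character list
  have hd : t.toList.foldl
      (fun d c => if (PySem.Set.ofList ['a', 'e', 'i', 'o', 'u'] : PySem.Set Char).contains c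
        then d.insert c (d.getD c 0 + 1) else d) PySem.Dict.empty
      = PySem.Dict.counter (t.toList.filter q) := by
    simp only [hqv]
    rw [foldl_if_insert_filter, PySem.Dict.foldl_insert_getD_add_one_eq_counter]
  rw [hd]
  -- A's items as the pair list B builds (over Char)
  have hitems : (PySem.Dict.counter (t.toList.filter q)).items
      = ((PySem.Set.ofList t.toList).filter q).map (fun k => (k, (t.toList.count k : Int))) := by
    rw [PySem.Dict.items_counter, ofList_filter]
    apply List.map_congr_left
    intro k hk
    have hqk : q k = true := (List.mem_filter.mp hk).2
    rw [List.count_filter hqk]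
  rw [hitems]
  -- B's pairs are the g-image of A's items
  have hpairs : ((PySem.List.dedup t.toList).filter q).map
        (fun c => (String.ofList [c], (PySem.Str.count t (String.ofList [c]) : Int)))
      = (((PySem.Set.ofList t.toList).filter q).map (fun k => (k, (t.toList.count k : Int)))).map
          (fun it => (String.ofList [it.1], it.2)) := by
    rw [PySem.List.dedup_eq_ofList, List.map_map]
    apply List.map_congr_left
    intro k _
    have hk1 : (String.ofList [k]).toList = [k] := by simp
    simp [Function.comp, PySem.Str.count_eq, hk1, chars_count_singleton]
  rw [hpairs]
  -- keys of the sorted items are nodup, so dict() is the identity on the list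
  have hnodup : ((PySem.List.sorted
      (((PySem.Set.ofList t.toList).filter q).map (fun k => (k, (t.toList.count k : Int))))
      (fun it => it.2) true).map Prod.fst).Nodup := by
    have hperm := PySem.List.sorted_perm
      (((PySem.Set.ofList t.toList).filter q).map (fun k => (k, (t.toList.count k : Int))))
      (fun it => it.2) true
    refine (hperm.map Prod.fst).nodup_iff.mpr ?_
    rw [List.map_map]
    have : (Prod.fst ∘ fun k => (k, (t.toList.count k : Int))) = id := by
      funext k; rfl
    rw [this, List.map_id]
    exact (PySem.Set.nodup_ofList t.toList).filter q
  rw [items_ofList_of_nodup _ hnodup]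
  exact sorted_map_snd (fun it : Char × Int => ((String.ofList [it.1] : String), it.2))
    (fun it : Char × Int => it.2) (fun p : String × Int => p.2) (fun a => rfl) _

-- ===== VERDICT (by name: the statement is the Claim_ definition above) =====
theorem number_of_vowels_spec : Claim_equal_number_of_vowels := by
  intro text _
  unfold Spec_number_of_vowels
  exact number_of_vowels_eq_alt text
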